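-- pv_equiv track=rewrite | github.com/fgmacedo/flashcards | flashcards/flashcards.py | extract_valid_words
-- ===== SOURCE A (Python) =====
-- from collections import Counter
--
-- def extract_valid_words(words, already_seen_words, allow_repeated):
--     if allow_repeated:
--         return sorted(words), None
--
--     words_in_group = Counter(words)
--     repeated_words = [word for word, count in words_in_group.items() if count > 1]
--     words_in_group = set(words_in_group)
--     new_words = words_in_group - already_seen_words
--     ignored_words = words_in_group - new_words
--     return sorted(new_words), set(repeated_words).union(ignored_words)
-- ===== SOURCE B (Python) =====
-- def extract_valid_words(words, already_seen_words, allow_repeated):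
--     if allow_repeated:
--         return sorted(words), None
--     new_words = []
--     repeated = set()
--     ignored = set()
--     for i, w in enumerate(words):
--         if w in words[:i]:
--             continue  # only handle each word at its first occurrence
--         if w in words[i + 1:]:
--             repeated.add(w)
--         if w in already_seen_words:
--             ignored.add(w)
--         else:
--             new_words.append(w)
--     return sorted(new_words), repeated | ignored
-- ===== Notes on version B (the rewrite author's own statement) =====
-- stated objective: alternative
-- what changed: Drops the Counter and the double set-subtraction entirely: one positional pass over words that handles each word only at its first occurrence (w not in words[:i]) and classifies it on the spot by tail membership (w in words[i+1:]) and by already_seen_words, accumulating new/repeated/ignored in a single loop with no table or count built.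
import Mathlib
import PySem

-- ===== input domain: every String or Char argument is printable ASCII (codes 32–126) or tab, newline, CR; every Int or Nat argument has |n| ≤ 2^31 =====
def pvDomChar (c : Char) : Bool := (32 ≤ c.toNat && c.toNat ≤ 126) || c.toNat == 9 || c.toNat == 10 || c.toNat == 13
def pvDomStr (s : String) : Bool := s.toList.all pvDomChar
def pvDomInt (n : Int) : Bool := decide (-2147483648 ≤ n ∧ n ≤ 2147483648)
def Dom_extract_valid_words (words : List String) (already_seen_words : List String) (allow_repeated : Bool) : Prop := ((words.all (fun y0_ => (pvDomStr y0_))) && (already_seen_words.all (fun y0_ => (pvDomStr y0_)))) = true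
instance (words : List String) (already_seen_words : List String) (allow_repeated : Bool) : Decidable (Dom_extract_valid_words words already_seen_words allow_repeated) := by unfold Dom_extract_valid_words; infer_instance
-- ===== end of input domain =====

-- B drops the Counter and all set algebra over it: one positional scan over `words` that handles each
-- word only at its first occurrence (w not in words[:i]) and classifies it by looking at the tail
-- (w in words[i+1:]) and at already_seen_words; alternative decomposition, no table built.
-- ===== PORT A =====
def extract_valid_words (words : List String) (already_seen_words : List String) (allow_repeated : Bool) : List String × Option (List String) :=
  if allow_repeated then (PySem.List.sorted words (fun x => x) false, none)
  else
    let words_in_group := PySem.Dict.counter words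
    let repeated_words := (words_in_group.items.filter (fun p => decide (1 < p.2))).map Prod.fst
    let words_in_group2 := PySem.Set.ofList words_in_group.keys
    let new_words := PySem.Set.diff words_in_group2 already_seen_words
    let ignored_words := PySem.Set.diff words_in_group2 new_words
    (PySem.List.sorted new_words (fun x => x) false,
     some (PySem.Set.union (PySem.Set.ofList repeated_words) ignored_words))

-- ===== PORT B =====
-- the loop body of B's single pass: skip non-first occurrences, else flag repeated (tail membership)
-- and route the word to ignored or new_words according to already_seen_words
def bstep (words : List String) (already_seen_words : List String)
    (st : List String × PySem.Set String × PySem.Set String) (p : Int × String) :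
    List String × PySem.Set String × PySem.Set String :=
  if (PySem.List.slice words none (some p.1)).contains p.2 then st
  else
    let rep := if (PySem.List.slice words (some (p.1 + 1)) none).contains p.2
               then PySem.Set.add st.2.1 p.2 else st.2.1
    if already_seen_words.contains p.2 then (st.1, rep, PySem.Set.add st.2.2 p.2)
    else (st.1 ++ [p.2], rep, st.2.2)

def extract_valid_words_alt (words : List String) (already_seen_words : List String) (allow_repeated : Bool) : List String × Option (List String) :=
  if allow_repeated then (PySem.List.sorted words (fun x => x) false, none)
  else
    let st := (PySem.List.enumerate words 0).foldl (bstep words already_seen_words)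
      ([], PySem.Set.empty, PySem.Set.empty)
    (PySem.List.sorted st.1 (fun x => x) false, some (PySem.Set.union st.2.1 st.2.2))

-- ===== PRECONDITION & SPEC =====
def Spec_extract_valid_words (words : List String) (already_seen_words : List String) (allow_repeated : Bool) (out : List String × Option (List String)) : Prop := out = extract_valid_words_alt words already_seen_words allow_repeated
instance (words : List String) (already_seen_words : List String) (allow_repeated : Bool) (out : List String × Option (List String)) : Decidable (Spec_extract_valid_words words already_seen_words allow_repeated out) := by unfold Spec_extract_valid_words; infer_instance

-- ===== CLAIM (what is proved, stated in full; the proofs are below) =====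
def Claim_equal_extract_valid_words : Prop := ∀ (words : List String) (already_seen_words : List String) (allow_repeated : Bool), Dom_extract_valid_words words already_seen_words allow_repeated → Spec_extract_valid_words words already_seen_words allow_repeated (extract_valid_words words already_seen_words allow_repeated)

-- ===== LEMMAS AND PROOFS =====

-- the state B's loop has produced after consuming the prefix t of words
def pvS (already_seen_words words t : List String) :
    List String × PySem.Set String × PySem.Set String :=
  ((PySem.Set.ofList t).filter (fun w => !already_seen_words.contains w),
   (PySem.Set.ofList t).filter (fun w => decide (1 < words.count w)),
   (PySem.Set.ofList t).filter (fun w => already_seen_words.contains w))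

lemma bstep_S (words asw : List String) (k : Nat) (w : String) (rest : List String)
    (h : words.drop k = w :: rest) :
    bstep words asw (pvS asw words (words.take k)) ((k : Int), w)
      = pvS asw words (words.take (k+1)) := by
  have hwk : words[k]? = some w := by
    rw [← List.head?_drop, h]; rfl
  have htake : words.take (k+1) = words.take k ++ [w] := by
    rw [List.take_add_one, hwk]; rfl
  have hdrop1 : words.drop (k+1) = rest := by
    have : List.drop 1 (words.drop k) = List.drop 1 (w :: rest) := by rw [h]
    simpa [List.drop_drop, Nat.add_comm] using this
  have hslice0 : PySem.List.slice words none (some ((k : Nat) : Int)) = words.take k :=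
    PySem.List.slice_to_natCast words k
  have hslice1 : PySem.List.slice words (some (((k : Nat) : Int) + 1)) none = words.drop (k+1) := by
    have : (((k : Nat) : Int) + 1) = (((k+1 : Nat)) : Int) := by push_cast; ring
    rw [this, PySem.List.slice_from_natCast]
  unfold bstep
  simp only [hslice0, hslice1, hdrop1]
  by_cases hmem : w ∈ words.take k
  · -- not the first occurrence: state unchanged
    have hc : (words.take k).contains w = true := by simpa using hmem
    rw [if_pos hc]
    have hofl : PySem.Set.ofList (words.take (k+1)) = PySem.Set.ofList (words.take k) := by
      rw [htake, PySem.Set.ofList_append_singleton, PySem.Set.add]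
      have : (PySem.Set.ofList (words.take k)).contains w = true := by
        simp [PySem.Set.contains_eq_listContains, PySem.Set.mem_ofList]
        exact hmem
      rw [if_pos this]
    unfold pvS
    rw [hofl]
  · -- first occurrence
    rw [if_neg (by simpa using hmem)]
    have hwords : words = words.take k ++ w :: rest := by
      conv_lhs => rw [← List.take_append_drop k words, h]
    have hofl : PySem.Set.ofList (words.take (k+1)) = PySem.Set.ofList (words.take k) ++ [w] := by
      rw [htake, PySem.Set.ofList_append_singleton, PySem.Set.add]
      rw [if_neg (by simp [PySem.Set.contains_eq_listContains, PySem.Set.mem_ofList, hmem])]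
    have hcount : (1 < words.count w) ↔ w ∈ rest := by
      have hck : (words.take k).count w = 0 := List.count_eq_zero.mpr hmem
      conv_lhs => rw [hwords]
      rw [List.count_append, hck, List.count_cons_self]
      constructor
      · intro hlt
        have : 0 < rest.count w := by omega
        exact List.count_pos_iff.mp this
      · intro hr
        have : 0 < rest.count w := List.count_pos_iff.mpr hr
        omega
    have hadd_rep : PySem.Set.add ((PySem.Set.ofList (words.take k)).filter
        (fun v => decide (1 < words.count v))) w
        = (PySem.Set.ofList (words.take k)).filter (fun v => decide (1 < words.count v)) ++ [w] := by
      rw [PySem.Set.add]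
      rw [if_neg (by simp [PySem.Set.contains_eq_listContains, List.mem_filter,
        PySem.Set.mem_ofList, hmem])]
    have hadd_ign : PySem.Set.add ((PySem.Set.ofList (words.take k)).filter
        (fun v => asw.contains v)) w
        = (PySem.Set.ofList (words.take k)).filter (fun v => asw.contains v) ++ [w] := by
      rw [PySem.Set.add]
      rw [if_neg (by simp [PySem.Set.contains_eq_listContains, List.mem_filter,
        PySem.Set.mem_ofList, hmem])]
    have h1 : List.filter (fun v => !asw.contains v) (PySem.Set.ofList (words.take (k+1)))
        = List.filter (fun v => !asw.contains v) (PySem.Set.ofList (words.take k))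
          ++ (if asw.contains w = true then [] else [w]) := by
      rw [hofl, List.filter_append]
      by_cases hx : w ∈ asw <;> simp [hx]
    have h2 : List.filter (fun v => decide (1 < words.count v)) (PySem.Set.ofList (words.take (k+1)))
        = (if rest.contains w = true then
            PySem.Set.add (List.filter (fun v => decide (1 < words.count v))
              (PySem.Set.ofList (words.take k))) w
           else List.filter (fun v => decide (1 < words.count v))
              (PySem.Set.ofList (words.take k))) := by
      rw [hofl, List.filter_append]
      by_cases hx : w ∈ rest
      · rw [if_pos (by simpa using hx), hadd_rep]
        simp [hcount.mpr hx]
      · rw [if_neg (by simpa using hx)]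
        have hle : ¬ (1 < words.count w) := fun hh => hx (hcount.mp hh)
        simp [hle]
    have h3 : List.filter (fun v => asw.contains v) (PySem.Set.ofList (words.take (k+1)))
        = (if asw.contains w = true then
            PySem.Set.add (List.filter (fun v => asw.contains v)
              (PySem.Set.ofList (words.take k))) w
           else List.filter (fun v => asw.contains v) (PySem.Set.ofList (words.take k))) := by
      rw [hofl, List.filter_append]
      by_cases hx : w ∈ asw
      · rw [if_pos (by simpa using hx), hadd_ign]; simp [hx]
      · rw [if_neg (by simpa using hx)]; simp [hx]
    show _ = pvS asw words (words.take (k+1))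
    unfold pvS
    rw [h1, h2, h3]
    by_cases hasw : w ∈ asw <;> by_cases hrw : w ∈ rest <;> simp [hasw, hrw]

lemma loop_spec (words asw : List String) : ∀ (ws : List String) (k : Nat), words.drop k = ws →
    (PySem.List.enumerate ws ((k : Nat) : Int)).foldl (bstep words asw)
      (pvS asw words (words.take k)) = pvS asw words words := by
  intro ws
  induction ws with
  | nil =>
    intro k h
    have : words.length ≤ k := by
      by_contra hlt
      have := List.drop_eq_nil_iff.mp h
      omega
    rw [List.take_of_length_le this]
    simp [PySem.List.enumerate]
  | cons w rest ih =>
    intro k h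
    have hdrop1 : words.drop (k+1) = rest := by
      have : List.drop 1 (words.drop k) = List.drop 1 (w :: rest) := by rw [h]
      simpa [List.drop_drop, Nat.add_comm] using this
    rw [PySem.List.enumerate_cons, List.foldl_cons, bstep_S words asw k w rest h]
    have hcast : (((k : Nat) : Int) + 1) = (((k+1 : Nat)) : Int) := by push_cast; ring
    rw [hcast]
    exact ih (k+1) hdrop1

-- ===== VERDICT (by name: the statement is the Claim_ definition above) =====
theorem extract_valid_words_spec : Claim_equal_extract_valid_words := by
  intro words already_seen_words allow_repeated _hdom
  unfold Spec_extract_valid_words extract_valid_words extract_valid_words_alt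
  cases allow_repeated with
  | true => simp
  | false =>
    have hB : (PySem.List.enumerate words 0).foldl (bstep words already_seen_words)
        ([], PySem.Set.empty, PySem.Set.empty) = pvS already_seen_words words words := by
      have h0 := loop_spec words already_seen_words words 0 (by simp)
      simpa [pvS, PySem.Set.empty, PySem.Set.ofList_nil] using h0
    simp only [Bool.false_eq_true, if_false, hB, PySem.Dict.keys_counter, PySem.Dict.items_counter,
      PySem.Set.ofList_ofList, PySem.Set.diff, PySem.Set.union, PySem.Set.contains, pvS]
    have hnd : (PySem.Set.ofList words).Nodup := PySem.Set.nodup_ofList words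
    have hrep : (((PySem.Set.ofList words).map (fun k => (k, (words.count k : Int)))).filter
        (fun p => decide (1 < p.2))).map Prod.fst
        = (PySem.Set.ofList words).filter (fun w => decide (1 < words.count w)) := by
      rw [List.filter_map, List.map_map]
      simp [Function.comp_def]
    have hofl1 : PySem.Set.ofList ((PySem.Set.ofList words).filter (fun w => decide (1 < words.count w)))
        = (PySem.Set.ofList words).filter (fun w => decide (1 < words.count w)) :=
      PySem.Set.ofList_eq_self_of_nodup _ (hnd.filter _)
    have hign : ((PySem.Set.ofList words).filter
          (fun x => !((PySem.Set.ofList words).filter (fun x => !already_seen_words.contains x)).contains x))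
        = (PySem.Set.ofList words).filter (fun w => already_seen_words.contains w) := by
      apply List.filter_congr
      intro x hx
      simp [List.mem_filter, hx]
    rw [hrep, hofl1, hign]
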